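/- GENERATED by mk_final_copies.py from the proof of the farm's unit `decode_residue.6ba` (farm:decode_residue.6ba.2: Proof.lean) as the
   re-elaboration sweep compiled it — do not edit. -/
import Vorbis.Spec.Units.decode_residue_6ba
import Vorbis.Spec.Worked.decode_residue_6ba_Lemmas

open X86 X86.User Asan Vorbis Vorbis.Spec Vorbis.Spec.DecodeResidue

/-- Unit `decode_residue.6ba`: THE BODY PROPER OF THE i-LOOP 2229 of decode_residue (`ch > 2`) BUT THE CALL ARM, from `AtTurn` (0x10f579): the
front with its seven check sites (`front6`), then the sign test of `b = residue_books[c][pass]`: `b ≥ 0` → `AtCall6` at 0x10f4ed with nothing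
changed; `b < 0` → `z += part_size`, `cdq ; idiv ch`, CI, the latch, the loop head with `(i + 1, pcount + 1)` (`arm6`); `body6ba` of
Lemmas.lean composes the two walks. -/
theorem Vorbis.Spec.Worked.decode_residue_6ba_ok : Vorbis.Spec.decode_residue_6ba.Statement := by
  intro Lay hLay μ hμ u₀ hcode h_load8 h_load4 h_load1 h_load2
  intro g hent pass cs i pcount v hat
  exact Vorbis.Spec.decode_residue_6ba.body6ba hLay hμ hcode h_load8 h_load4 h_load1 h_load2 hent pass cs i pcount v hat
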